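-- pv_equiv track=rewrite | github.com/himi1/Codefights | Tournaments/CodeMaster'sTourneySolutionsPart3.py | segmentSumsMatrix1
-- ===== SOURCE A (Python) =====
-- def segmentSumsMatrix1(inputArray):
--
--     answer = []
--     for i in range(len(inputArray)):
--         line = []
--         for j in range(len(inputArray)):
--             line.append(0)
--         answer.append(line)
--
--     for i in range(len(inputArray)):
--         for j in range(i, -1, -1):
--             for k in range(i, len(inputArray)):
--                 answer[j][k] += inputArray[i]
--                 answer[k][j] += inputArray[i]
--         answer[i][i] -= inputArray[i]
--
--     return answer
-- ===== SOURCE B (Python) =====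
-- def segmentSumsMatrix1(inputArray):
--     n = len(inputArray)
--     prefix = [0]
--     s = 0
--     for v in inputArray:
--         s += v
--         prefix.append(s)
--     return [[prefix[max(r, c) + 1] - prefix[min(r, c)] for c in range(n)]
--             for r in range(n)]
-- ===== Notes on version B (the rewrite author's own statement) =====
-- stated objective: faster
-- what changed: Replaces A's cubic triple loop of in-place matrix increments with a single prefix-sum pass, computing each entry directly as prefix[max(r,c)+1] - prefix[min(r,c)].
import Mathlib
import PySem

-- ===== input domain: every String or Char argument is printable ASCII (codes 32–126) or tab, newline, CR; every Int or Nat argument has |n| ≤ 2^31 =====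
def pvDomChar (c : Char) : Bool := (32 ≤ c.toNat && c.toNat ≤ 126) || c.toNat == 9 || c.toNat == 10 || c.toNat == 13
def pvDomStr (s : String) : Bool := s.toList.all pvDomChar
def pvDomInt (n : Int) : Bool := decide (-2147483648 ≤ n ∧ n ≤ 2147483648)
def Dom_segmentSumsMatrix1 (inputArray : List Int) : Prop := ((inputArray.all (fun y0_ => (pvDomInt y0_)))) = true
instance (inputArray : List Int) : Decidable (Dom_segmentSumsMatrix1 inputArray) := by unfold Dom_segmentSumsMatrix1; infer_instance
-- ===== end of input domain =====

-- B replaces A's cubic triple loop with a prefix-sum table: answer[r][c] = prefix[max(r,c)+1] - prefix[min(r,c)] (objective: faster).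

-- ===== PORT A =====
-- answer[j][k] += x  (j, k are always in range when A executes this)
def pvUpd (M : List (List Int)) (j k : Int) (x : Int) : List (List Int) :=
  M.modify j.toNat (fun row => row.modify k.toNat (· + x))

def segmentSumsMatrix1 (inputArray : List Int) : List (List Int) :=
  let n : Int := (inputArray.length : Int)
  -- build the zero matrix by appending rows, as A does
  let answer := (PySem.List.pyRange 0 n 1).foldl
    (fun ans _ => ans ++ [(PySem.List.pyRange 0 n 1).foldl (fun line _ => line ++ [(0 : Int)]) []]) []
  (PySem.List.pyRange 0 n 1).foldl
    (fun ans i =>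
      let v := PySem.List.pyGetD inputArray i 0   -- inputArray[i], i always in range
      let ans := (PySem.List.pyRange i (-1) (-1)).foldl
        (fun ans j =>
          (PySem.List.pyRange i n 1).foldl
            (fun ans k => pvUpd (pvUpd ans j k v) k j v) ans) ans
      pvUpd ans i i (-v)) answer

-- ===== PORT B =====
def segmentSumsMatrix1_alt (inputArray : List Int) : List (List Int) :=
  let n : Int := (inputArray.length : Int)
  let ps := inputArray.foldl (fun (p : List Int × Int) v => (p.1 ++ [p.2 + v], p.2 + v)) ([0], 0)
  let pre := ps.1
  (PySem.List.pyRange 0 n 1).map (fun r =>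
    (PySem.List.pyRange 0 n 1).map (fun c =>
      PySem.List.pyGetD pre (max r c + 1) 0 - PySem.List.pyGetD pre (min r c) 0))

-- ===== PRECONDITION & SPEC =====
def Spec_segmentSumsMatrix1 (inputArray : List Int) (out : List (List Int)) : Prop := out = segmentSumsMatrix1_alt inputArray
instance (inputArray : List Int) (out : List (List Int)) : Decidable (Spec_segmentSumsMatrix1 inputArray out) := by unfold Spec_segmentSumsMatrix1; infer_instance

-- ===== CLAIM (what is proved, stated in full; the proofs are below) =====
def Claim_equal_segmentSumsMatrix1 : Prop := ∀ (inputArray : List Int), Dom_segmentSumsMatrix1 inputArray → Spec_segmentSumsMatrix1 inputArray (segmentSumsMatrix1 inputArray)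

-- ===== LEMMAS AND PROOFS =====

-- entry (r,c) of a matrix, total (0 outside)
def pvEnt (M : List (List Int)) (r c : Nat) : Int := (M.getD r []).getD c 0

-- an n×n matrix
def pvShape (n : Nat) (M : List (List Int)) : Prop :=
  M.length = n ∧ ∀ r, r < n → (M.getD r []).length = n

-- partial sum of the first t entries, written over range/getD
def pvS (xs : List Int) (t : Nat) : Int := ((List.range t).map (fun i => xs.getD i 0)).sum

-- the common closed form both ports are proved equal to
def pvTarget (xs : List Int) : List (List Int) :=
  (List.range xs.length).map (fun r =>
    (List.range xs.length).map (fun c => pvS xs (max r c + 1) - pvS xs (min r c)))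

theorem pvEnt_upd {n : Nat} {M : List (List Int)} (hM : pvShape n M)
    (j k : Int) (hj0 : 0 ≤ j) (hj : j < (n : Int)) (hk0 : 0 ≤ k) (hk : k < (n : Int))
    (x : Int) (r c : Nat) (hrn : r < n) (hcn : c < n) :
    pvEnt (pvUpd M j k x) r c = pvEnt M r c + (if j = (r : Int) ∧ k = (c : Int) then x else 0) := by
  obtain ⟨hl, hrow⟩ := hM
  have hrM : r < M.length := by omega
  have hrM' : r < (pvUpd M j k x).length := by simpa [pvUpd] using hrM
  have hcrow : c < (M.getD r []).length := by rw [hrow r hrn]; exact hcn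
  have hcrow' : c < (M[r]'hrM).length := by rwa [List.getD_eq_getElem _ _ hrM] at hcrow
  simp only [pvUpd] at hrM'
  unfold pvEnt pvUpd
  rw [List.getD_eq_getElem _ _ hrM', List.getD_eq_getElem _ _ hrM]
  rw [List.getElem_modify]
  by_cases hjr : j.toNat = r
  · have hjr' : j = (r : Int) := by omega
    rw [if_pos hjr]
    have hcmod : c < ((M[r]'hrM).modify k.toNat (· + x)).length := by
      simpa [List.length_modify] using hcrow'
    rw [List.getD_eq_getElem _ _ hcmod, List.getD_eq_getElem _ _ hcrow']
    rw [List.getElem_modify]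
    by_cases hkc : k.toNat = c
    · have : k = (c : Int) := by omega
      simp [this, hjr']
    · have : ¬ k = (c : Int) := by omega
      simp [this, hkc]
  · have : ¬ j = (r : Int) := by omega
    simp [hjr, this]

theorem pvShape_upd {n : Nat} {M : List (List Int)} (hM : pvShape n M) (j k x : Int) :
    pvShape n (pvUpd M j k x) := by
  obtain ⟨hl, hr⟩ := hM
  refine ⟨by simp [pvUpd, hl], ?_⟩
  intro r hrn
  by_cases h : r < M.length
  · have h' : r < (pvUpd M j k x).length := by simpa [pvUpd] using h
    rw [List.getD_eq_getElem _ _ h']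
    simp only [pvUpd] at h' ⊢
    rw [List.getElem_modify]
    split
    · rw [← List.getD_eq_getElem _ ([] : List Int) h]
      simpa using hr r hrn
    · rw [← List.getD_eq_getElem _ ([] : List Int) h]; exact hr r hrn
  · omega

theorem pvIteSplit (P Q R : Prop) [Decidable P] [Decidable Q] [Decidable R] (v : Int) (h : ¬(Q ∧ R)) :
    (if P ∧ Q then v else 0) + (if P ∧ R then v else 0) = if P ∧ (Q ∨ R) then v else 0 := by
  by_cases hP : P <;> by_cases hQ : Q <;> by_cases hR : R <;> simp_all

theorem pvInnerLoop {n : Nat} (v : Int) (j : Int) (hj0 : 0 ≤ j) (hj : j < (n : Int)) :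
    ∀ (ks : List Int), (∀ k ∈ ks, 0 ≤ k ∧ k < (n : Int)) → ks.Nodup →
    ∀ (M : List (List Int)), pvShape n M → ∀ (r c : Nat), r < n → c < n →
    pvEnt (ks.foldl (fun ans k => pvUpd (pvUpd ans j k v) k j v) M) r c
      = pvEnt M r c + (if j = (r : Int) ∧ (c : Int) ∈ ks then v else 0)
                    + (if j = (c : Int) ∧ (r : Int) ∈ ks then v else 0) := by
  intro ks
  induction ks with
  | nil => intro _ _ M hM r c hr hc; simp
  | cons k ks ih =>
    intro hb hnd M hM r c hr hc
    simp only [List.foldl_cons]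
    have hk := hb k (by simp)
    have hM1 : pvShape n (pvUpd M j k v) := pvShape_upd hM _ _ _
    have hM2 : pvShape n (pvUpd (pvUpd M j k v) k j v) := pvShape_upd hM1 _ _ _
    rw [ih (fun x hx => hb x (by simp [hx])) hnd.of_cons _ hM2 r c hr hc]
    rw [pvEnt_upd hM1 k j hk.1 hk.2 hj0 hj v r c hr hc]
    rw [pvEnt_upd hM j k hj0 hj hk.1 hk.2 v r c hr hc]
    have hknotin : k ∉ ks := (List.nodup_cons.mp hnd).1
    have h1 : ¬((c : Int) = k ∧ (c : Int) ∈ ks) := fun ⟨e, m⟩ => hknotin (e ▸ m)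
    have h2 : ¬((r : Int) = k ∧ (r : Int) ∈ ks) := fun ⟨e, m⟩ => hknotin (e ▸ m)
    simp only [List.mem_cons]
    have hA1 : (j = (r : Int) ∧ k = (c : Int)) = (j = (r : Int) ∧ (c : Int) = k) := propext (by tauto)
    have hA2 : (k = (r : Int) ∧ j = (c : Int)) = (j = (c : Int) ∧ (r : Int) = k) := propext (by tauto)
    simp only [hA1, hA2]
    have e1 := pvIteSplit (j = (r : Int)) ((c : Int) = k) ((c : Int) ∈ ks) v h1
    have e2 := pvIteSplit (j = (c : Int)) ((r : Int) = k) ((r : Int) ∈ ks) v h2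
    omega

theorem pvShape_foldl {n : Nat} {α : Type} (step : List (List Int) → α → List (List Int))
    (hstep : ∀ M x, pvShape n M → pvShape n (step M x)) :
    ∀ (l : List α) (M : List (List Int)), pvShape n M → pvShape n (l.foldl step M) := by
  intro l
  induction l with
  | nil => intro M hM; exact hM
  | cons a l ih => intro M hM; exact ih _ (hstep M a hM)

theorem pvJLoop {n : Nat} (v : Int) (i : Nat) (hi : i < n) :
    ∀ (js : List Int), (∀ j ∈ js, 0 ≤ j ∧ j < (n : Int)) → js.Nodup →
    ∀ (M : List (List Int)), pvShape n M → ∀ (r c : Nat), r < n → c < n →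
    pvEnt (js.foldl (fun ans j =>
        (PySem.List.pyRange (i : Int) (n : Int) 1).foldl
          (fun ans k => pvUpd (pvUpd ans j k v) k j v) ans) M) r c
      = pvEnt M r c + (if (r : Int) ∈ js ∧ i ≤ c then v else 0)
                    + (if (c : Int) ∈ js ∧ i ≤ r then v else 0) := by
  intro js
  induction js with
  | nil => intro _ _ M hM r c hr hc; simp
  | cons j js ih =>
    intro hb hnd M hM r c hr hc
    simp only [List.foldl_cons]
    have hj := hb j (by simp)
    have hkb : ∀ k ∈ PySem.List.pyRange (i : Int) (n : Int) 1, 0 ≤ k ∧ k < (n : Int) := by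
      intro k hk
      rw [PySem.List.mem_pyRange_one] at hk
      constructor <;> omega
    have hknd := PySem.List.nodup_pyRange_one (a := (i : Int)) (b := (n : Int))
    have hM1 : pvShape n ((PySem.List.pyRange (i : Int) (n : Int) 1).foldl
        (fun ans k => pvUpd (pvUpd ans j k v) k j v) M) := by
      refine pvShape_foldl _ ?_ _ _ hM
      intro M' k hM'
      exact pvShape_upd (pvShape_upd hM' _ _ _) _ _ _
    rw [ih (fun x hx => hb x (by simp [hx])) hnd.of_cons _ hM1 r c hr hc]
    rw [pvInnerLoop v j hj.1 hj.2 _ hkb hknd M hM r c hr hc]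
    have hjnotin : j ∉ js := (List.nodup_cons.mp hnd).1
    have h1 : ¬(((r : Int) = j) ∧ (r : Int) ∈ js) := fun ⟨e, m⟩ => hjnotin (e ▸ m)
    have h2 : ¬(((c : Int) = j) ∧ (c : Int) ∈ js) := fun ⟨e, m⟩ => hjnotin (e ▸ m)
    have hmc : ((c : Int) ∈ PySem.List.pyRange (i : Int) (n : Int) 1) = (i ≤ c) := by
      rw [PySem.List.mem_pyRange_one]
      exact propext ⟨fun h => by omega, fun h => by constructor <;> omega⟩
    have hmr : ((r : Int) ∈ PySem.List.pyRange (i : Int) (n : Int) 1) = (i ≤ r) := by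
      rw [PySem.List.mem_pyRange_one]
      exact propext ⟨fun h => by omega, fun h => by constructor <;> omega⟩
    simp only [hmc, hmr, List.mem_cons]
    have hB1 : (j = (r : Int) ∧ i ≤ c) = ((i ≤ c) ∧ (r : Int) = j) :=
      propext ⟨fun ⟨a, b⟩ => ⟨b, a.symm⟩, fun ⟨b, a⟩ => ⟨a.symm, b⟩⟩
    have hB2 : (j = (c : Int) ∧ i ≤ r) = ((i ≤ r) ∧ (c : Int) = j) :=
      propext ⟨fun ⟨a, b⟩ => ⟨b, a.symm⟩, fun ⟨b, a⟩ => ⟨a.symm, b⟩⟩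
    have hC1 : (((r : Int) = j ∨ (r : Int) ∈ js) ∧ i ≤ c) = ((i ≤ c) ∧ ((r : Int) = j ∨ (r : Int) ∈ js)) := propext and_comm
    have hC2 : (((c : Int) = j ∨ (c : Int) ∈ js) ∧ i ≤ r) = ((i ≤ r) ∧ ((c : Int) = j ∨ (c : Int) ∈ js)) := propext and_comm
    have hD1 : ((r : Int) ∈ js ∧ i ≤ c) = ((i ≤ c) ∧ (r : Int) ∈ js) := propext and_comm
    have hD2 : ((c : Int) ∈ js ∧ i ≤ r) = ((i ≤ r) ∧ (c : Int) ∈ js) := propext and_comm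
    simp only [hB1, hB2, hC1, hC2, hD1, hD2]
    have e1 := pvIteSplit (i ≤ c) ((r : Int) = j) ((r : Int) ∈ js) v h1
    have e2 := pvIteSplit (i ≤ r) ((c : Int) = j) ((c : Int) ∈ js) v h2
    omega

theorem pvShape_body {n : Nat} {xs : List Int} (i : Int) (M : List (List Int)) (hM : pvShape n M) :
    pvShape n (pvUpd ((PySem.List.pyRange i (-1) (-1)).foldl
        (fun ans j =>
          (PySem.List.pyRange i (n : Int) 1).foldl
            (fun ans k => pvUpd (pvUpd ans j k (PySem.List.pyGetD xs i 0)) k j (PySem.List.pyGetD xs i 0)) ans) M)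
        i i (-(PySem.List.pyGetD xs i 0))) := by
  refine pvShape_upd ?_ _ _ _
  refine pvShape_foldl _ ?_ _ _ hM
  intro M' j hM'
  refine pvShape_foldl _ ?_ _ _ hM'
  intro M'' k hM''
  exact pvShape_upd (pvShape_upd hM'' _ _ _) _ _ _

theorem pvBody {xs : List Int} {n : Nat} (i : Int) (hi0 : 0 ≤ i) (hi : i < (n : Int))
    (M : List (List Int)) (hM : pvShape n M) (r c : Nat) (hrn : r < n) (hcn : c < n) :
    pvEnt (pvUpd ((PySem.List.pyRange i (-1) (-1)).foldl
        (fun ans j =>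
          (PySem.List.pyRange i (n : Int) 1).foldl
            (fun ans k => pvUpd (pvUpd ans j k (PySem.List.pyGetD xs i 0)) k j (PySem.List.pyGetD xs i 0)) ans) M)
        i i (-(PySem.List.pyGetD xs i 0))) r c
      = pvEnt M r c + (if ((min r c : Nat) : Int) ≤ i ∧ i ≤ ((max r c : Nat) : Int) then PySem.List.pyGetD xs i 0 else 0) := by
  set v := PySem.List.pyGetD xs i 0 with hv
  obtain ⟨iN, rfl⟩ : ∃ m : Nat, i = (m : Int) := ⟨i.toNat, by omega⟩
  have hiN : iN < n := by omega
  have hjb : ∀ j ∈ PySem.List.pyRange (iN : Int) (-1) (-1), 0 ≤ j ∧ j < (n : Int) := by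
    intro j hj
    rw [PySem.List.mem_pyRange_neg_one] at hj
    constructor <;> omega
  have hjnd : (PySem.List.pyRange (iN : Int) (-1) (-1)).Nodup := by
    rw [PySem.List.pyRange_neg_one_eq_reverse]
    exact List.nodup_reverse.mpr (PySem.List.nodup_pyRange_one _ _)
  have hMfold : pvShape n ((PySem.List.pyRange (iN : Int) (-1) (-1)).foldl
      (fun ans j => (PySem.List.pyRange (iN : Int) (n : Int) 1).foldl
        (fun ans k => pvUpd (pvUpd ans j k v) k j v) ans) M) := by
    refine pvShape_foldl _ ?_ _ _ hM
    intro M' j hM'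
    refine pvShape_foldl _ ?_ _ _ hM'
    intro M'' k hM''
    exact pvShape_upd (pvShape_upd hM'' _ _ _) _ _ _
  rw [pvEnt_upd hMfold ((iN : Nat) : Int) ((iN : Nat) : Int) (by omega) (by omega) (by omega) (by omega) (-v) r c hrn hcn]
  rw [pvJLoop v iN hiN _ hjb hjnd M hM r c hrn hcn]
  have hmr : ((r : Int) ∈ PySem.List.pyRange (iN : Int) (-1) (-1)) = (r ≤ iN) := by
    rw [PySem.List.mem_pyRange_neg_one]
    exact propext ⟨fun h => by omega, fun h => by constructor <;> omega⟩
  have hmc : ((c : Int) ∈ PySem.List.pyRange (iN : Int) (-1) (-1)) = (c ≤ iN) := by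
    rw [PySem.List.mem_pyRange_neg_one]
    exact propext ⟨fun h => by omega, fun h => by constructor <;> omega⟩
  simp only [hmr, hmc]
  split_ifs <;> omega

theorem pvILoop {xs : List Int} {n : Nat} :
    ∀ (is : List Int), (∀ i ∈ is, 0 ≤ i ∧ i < (n : Int)) →
    ∀ (M : List (List Int)), pvShape n M → ∀ (r c : Nat), r < n → c < n →
    pvEnt (is.foldl (fun ans i =>
        pvUpd ((PySem.List.pyRange i (-1) (-1)).foldl
          (fun ans j =>
            (PySem.List.pyRange i (n : Int) 1).foldl
              (fun ans k => pvUpd (pvUpd ans j k (PySem.List.pyGetD xs i 0)) k j (PySem.List.pyGetD xs i 0)) ans) ans)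
          i i (-(PySem.List.pyGetD xs i 0))) M) r c
      = pvEnt M r c
        + (is.map (fun i => if ((min r c : Nat) : Int) ≤ i ∧ i ≤ ((max r c : Nat) : Int) then PySem.List.pyGetD xs i 0 else 0)).sum := by
  intro is
  induction is with
  | nil => intro _ M hM r c hr hc; simp
  | cons i is ih =>
    intro hb M hM r c hr hc
    simp only [List.foldl_cons, List.map_cons, List.sum_cons]
    have hi := hb i (by simp)
    rw [ih (fun x hx => hb x (by simp [hx])) _ (pvShape_body i M hM) r c hr hc]
    rw [pvBody i hi.1 hi.2 M hM r c hr hc]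
    ring

theorem pvHalfInterval (a : Nat → Int) (lo : Nat) :
    ∀ t, lo ≤ t → ((List.range t).map (fun i => if lo ≤ i then a i else 0)).sum
      = ((List.range t).map a).sum - ((List.range lo).map a).sum := by
  intro t
  induction t with
  | zero =>
    intro h
    have : lo = 0 := by omega
    simp [this]
  | succ t ih =>
    intro h
    by_cases hlt : lo ≤ t
    · rw [List.range_succ]
      simp only [List.map_append, List.sum_append, List.map_cons, List.map_nil, List.sum_cons,
        List.sum_nil]
      rw [ih hlt, if_pos hlt]
      ring
    · have hlo : lo = t + 1 := by omega
      subst hlo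
      have hz : ∀ i ∈ List.range (t + 1), (if t + 1 ≤ i then a i else 0) = 0 := by
        intro i hi
        rw [List.mem_range] at hi
        rw [if_neg (by omega)]
      rw [List.map_congr_left hz]
      simp

theorem pvInterval (a : Nat → Int) (lo hi : Nat) (hlohi : lo ≤ hi) :
    ∀ n, hi < n → ((List.range n).map (fun i => if lo ≤ i ∧ i ≤ hi then a i else 0)).sum
      = ((List.range (hi + 1)).map a).sum - ((List.range lo).map a).sum := by
  intro n
  induction n with
  | zero => intro h; omega
  | succ n ih =>
    intro h
    by_cases hn : hi < n
    · rw [List.range_succ]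
      simp only [List.map_append, List.sum_append, List.map_cons, List.map_nil, List.sum_cons,
        List.sum_nil]
      rw [ih hn, if_neg (by omega)]
      ring
    · rw [show n = hi by omega]
      have hcong : ∀ i ∈ List.range (hi + 1), (if lo ≤ i ∧ i ≤ hi then a i else 0)
          = (if lo ≤ i then a i else 0) := by
        intro i hi'
        rw [List.mem_range] at hi'
        by_cases hl : lo ≤ i
        · rw [if_pos ⟨hl, by omega⟩, if_pos hl]
        · rw [if_neg (fun h' => hl h'.1), if_neg hl]
      rw [List.map_congr_left hcong]
      exact pvHalfInterval a lo (hi + 1) (by omega)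

theorem pvA_eq_target (xs : List Int) : segmentSumsMatrix1 xs = pvTarget xs := by
  set n := xs.length with hn
  have hinit : (PySem.List.pyRange 0 (n : Int) 1).foldl
      (fun ans _ => ans ++ [(PySem.List.pyRange 0 (n : Int) 1).foldl (fun line _ => line ++ [(0 : Int)]) []]) []
      = List.replicate n (List.replicate n (0 : Int)) := by
    rw [PySem.List.foldl_append_singleton_eq_map
      (fun _ => (PySem.List.pyRange 0 (n : Int) 1).foldl (fun line _ => line ++ [(0 : Int)]) []) _ []]
    rw [PySem.List.foldl_append_singleton_eq_map (fun _ => (0 : Int)) _ []]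
    simp [List.map_const', PySem.List.length_pyRange_one]
  have hshape0 : pvShape n (List.replicate n (List.replicate n (0 : Int))) := by
    refine ⟨by simp, fun r hr => ?_⟩
    rw [List.getD_eq_getElem _ _ (by simpa using hr), List.getElem_replicate]
    simp
  have hA : segmentSumsMatrix1 xs = (PySem.List.pyRange 0 (n : Int) 1).foldl
      (fun ans i =>
        pvUpd ((PySem.List.pyRange i (-1) (-1)).foldl
          (fun ans j =>
            (PySem.List.pyRange i (n : Int) 1).foldl
              (fun ans k => pvUpd (pvUpd ans j k (PySem.List.pyGetD xs i 0)) k j (PySem.List.pyGetD xs i 0)) ans) ans)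
          i i (-(PySem.List.pyGetD xs i 0)))
      (List.replicate n (List.replicate n (0 : Int))) := by
    rw [segmentSumsMatrix1, ← hinit]
  have hib : ∀ i ∈ PySem.List.pyRange 0 (n : Int) 1, 0 ≤ i ∧ i < (n : Int) := by
    intro i hi
    rw [PySem.List.mem_pyRange_one] at hi
    exact hi
  have hshapeA : pvShape n (segmentSumsMatrix1 xs) := by
    rw [hA]
    exact pvShape_foldl _ (fun M i hM => pvShape_body i M hM) _ _ hshape0
  have hent0 : ∀ r c : Nat, r < n → c < n →
      pvEnt (List.replicate n (List.replicate n (0 : Int))) r c = 0 := by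
    intro r c hr hc
    unfold pvEnt
    rw [List.getD_replicate _ hr, List.getD_replicate _ hc]
  have hmain : ∀ r c : Nat, r < n → c < n →
      pvEnt (segmentSumsMatrix1 xs) r c = pvS xs (max r c + 1) - pvS xs (min r c) := by
    intro r c hr hc
    rw [hA, pvILoop _ hib _ hshape0 r c hr hc, hent0 r c hr hc, zero_add]
    rw [PySem.List.pyRange_one, List.map_map]
    have hcong : ∀ k ∈ List.range ((n : Int) - 0).toNat,
        ((fun i => if ((min r c : Nat) : Int) ≤ i ∧ i ≤ ((max r c : Nat) : Int) then PySem.List.pyGetD xs i 0 else 0) ∘ fun k : Nat => (0 : Int) + ↑k) k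
          = (fun k : Nat => if min r c ≤ k ∧ k ≤ max r c then xs.getD k 0 else 0) k := by
      intro k hk
      simp only [Function.comp_apply, zero_add, PySem.List.pyGetD_natCast, Nat.cast_le]
    rw [List.map_congr_left hcong]
    have hT : ((n : Int) - 0).toNat = n := by omega
    rw [hT, pvInterval (fun i => xs.getD i 0) (min r c) (max r c) (by omega) n (by omega)]
    rfl
  -- assemble into a list equality
  apply List.ext_getElem
  · rw [hshapeA.1]
    simp only [pvTarget, List.length_map, List.length_range]
    exact hn
  · intro r h1 h2
    have hrn : r < n := by rw [hshapeA.1] at h1; exact h1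
    apply List.ext_getElem
    · have hrow := hshapeA.2 r hrn
      rw [List.getD_eq_getElem _ _ h1] at hrow
      rw [hrow]
      simp only [pvTarget, List.getElem_map, List.getElem_range, List.length_map, List.length_range]
      exact hn
    · intro c hc1 hc2
      have hcn : c < n := by
        have hrow := hshapeA.2 r hrn
        rw [List.getD_eq_getElem _ _ h1] at hrow
        omega
      have hm := hmain r c hrn hcn
      unfold pvEnt at hm
      rw [List.getD_eq_getElem _ _ h1, List.getD_eq_getElem _ _ hc1] at hm
      rw [hm]
      simp only [pvTarget, List.getElem_map, List.getElem_range]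

theorem pvPrefixFold (xs : List Int) :
    ∀ (p : List Int) (s : Int),
      (xs.foldl (fun (q : List Int × Int) v => (q.1 ++ [q.2 + v], q.2 + v)) (p, s)).1
        = p ++ (List.range xs.length).map (fun t => s + (xs.take (t + 1)).sum) := by
  induction xs with
  | nil => intro p s; simp
  | cons v xs ih =>
    intro p s
    simp only [List.foldl_cons]
    rw [ih (p ++ [s + v]) (s + v)]
    rw [List.length_cons, List.range_succ_eq_map, List.map_cons, List.map_map]
    simp only [List.append_assoc, List.singleton_append, List.take_succ_cons, List.sum_cons,
      List.take_zero, List.sum_nil, add_zero]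
    congr 2
    apply List.map_congr_left
    intro t _
    simp only [Function.comp_apply]
    ring

theorem pvTake_sum (xs : List Int) (t : Nat) (ht : t ≤ xs.length) : (xs.take t).sum = pvS xs t := by
  induction t with
  | zero => simp [pvS]
  | succ t ih =>
    have ht' : t < xs.length := by omega
    rw [List.take_add_one]
    unfold pvS
    rw [List.range_succ, List.map_append, List.sum_append]
    rw [ih (by omega)]
    unfold pvS
    simp [List.getElem?_eq_getElem ht']

theorem pvB_eq_target (xs : List Int) : segmentSumsMatrix1_alt xs = pvTarget xs := by
  set n := xs.length with hn
  have hpre : (xs.foldl (fun (q : List Int × Int) v => (q.1 ++ [q.2 + v], q.2 + v)) ([0], 0)).1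
      = (List.range (n + 1)).map (fun t => pvS xs t) := by
    rw [pvPrefixFold xs [0] 0]
    rw [List.range_succ_eq_map, List.map_cons, List.map_map]
    have h0 : pvS xs 0 = 0 := by simp [pvS]
    rw [h0, List.singleton_append]
    congr 1
    apply List.map_congr_left
    intro t ht
    rw [List.mem_range] at ht
    simp only [Function.comp_apply, zero_add]
    rw [pvTake_sum xs (t + 1) (by omega)]
  rw [segmentSumsMatrix1_alt, hpre]
  rw [PySem.List.pyRange_one]
  have hT : ((n : Int) - 0).toNat = n := by omega
  rw [hT, List.map_map, pvTarget, ← hn]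
  apply List.map_congr_left
  intro r hr
  rw [List.mem_range] at hr
  simp only [Function.comp_apply, zero_add]
  rw [List.map_map]
  apply List.map_congr_left
  intro c hc
  rw [List.mem_range] at hc
  simp only [Function.comp_apply]
  have hmax : (max ((r : Int)) ((c : Int))) + 1 = ((max r c + 1 : Nat) : Int) := by push_cast; ring
  have hmin : (min ((r : Int)) ((c : Int))) = ((min r c : Nat) : Int) := by push_cast; ring
  rw [hmax, hmin, PySem.List.pyGetD_natCast, PySem.List.pyGetD_natCast]
  rw [PySem.List.getD_map_range _ _ _ _ (by omega), PySem.List.getD_map_range _ _ _ _ (by omega)]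

-- ===== VERDICT (by name: the statement is the Claim_ definition above) =====
theorem segmentSumsMatrix1_spec : Claim_equal_segmentSumsMatrix1 := by
  intro xs _
  unfold Spec_segmentSumsMatrix1
  rw [pvA_eq_target, pvB_eq_target]
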